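-- pv_equiv track=rewrite | github.com/FARHANFADHILA/belajar_kripto | main.py | binary_to_matrix
-- ===== SOURCE A (Python) =====
-- def binary_to_matrix(plain_text):
--
--     def make_to_8_bit(str_bin):
--         while len(str_bin) < 8:
--             str_bin = "0"+str_bin
--         return str_bin
--
--     cache_arr = []
--     for word in plain_text:
--
--         to_ascii = ord(word)
--         to_binary = bin(to_ascii).replace('0b','')
--
--         convert_to_8bit = make_to_8_bit(to_binary)
--         convert_bin_to_arr = list(convert_to_8bit)
--
--         cache_arr.append(convert_bin_to_arr)
--
--     plain_text_arr = []
--     for i in range(0, len(cache_arr), 8):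
--         plain_text_arr.append(cache_arr[i:i+8])
--     return plain_text_arr
-- ===== SOURCE B (Python) =====
-- def binary_to_matrix(plain_text):
--     rows = []
--     current = []
--     for ch in plain_text:
--         code = ord(ch)
--         bits = []
--         for _ in range(8):
--             bits.append(str(code & 1))
--             code >>= 1
--         bits.reverse()
--         current.append(bits)
--         if len(current) == 8:
--             rows.append(current)
--             current = []
--     if current:
--         rows.append(current)
--     return rows
-- ===== Notes on version B (the rewrite author's own statement) =====
-- stated objective: alternative
-- what changed: B is a single streaming pass that extracts each character's 8 bits arithmetically (mask/shift, LSB-first, then reverse) and flushes an accumulator row every 8 characters, instead of A's two staged passes that first format every character via bin() with while-loop zero-padding into a cached flat list and then slice that list by index ranges.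
import Mathlib
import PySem

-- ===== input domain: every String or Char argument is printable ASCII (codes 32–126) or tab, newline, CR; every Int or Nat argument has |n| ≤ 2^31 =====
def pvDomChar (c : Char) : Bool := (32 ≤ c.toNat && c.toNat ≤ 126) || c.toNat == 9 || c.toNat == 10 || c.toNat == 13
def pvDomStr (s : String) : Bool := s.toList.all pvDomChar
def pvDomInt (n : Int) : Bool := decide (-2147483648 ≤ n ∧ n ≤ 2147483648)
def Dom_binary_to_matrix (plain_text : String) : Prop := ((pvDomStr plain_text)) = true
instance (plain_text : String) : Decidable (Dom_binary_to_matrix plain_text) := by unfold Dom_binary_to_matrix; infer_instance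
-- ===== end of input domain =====

-- B is a single streaming pass (arithmetic mask/shift bit extraction, accumulator row flushed
-- every 8 characters) replacing A's two staged passes (bin()-format every char into a cached
-- flat list, then slice it by index ranges); objective: alternative algorithm, same cost.

-- ===== PORT A =====
-- while len(str_bin) < 8: str_bin = "0"+str_bin
-- fuel 8 always suffices: each iteration grows the length by one, and the loop stops at length 8
def pvPad8Go : Nat → List Char → List Char
  | 0, s => s
  | k + 1, s => if s.length < 8 then pvPad8Go k ('0' :: s) else s
def pvPad8 (s : List Char) : List Char := pvPad8Go 8 s

-- one iteration of A's first loop body: bin(ord(c)).replace('0b',''), pad, list(...)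
def pvCharBitsA (c : Char) : List String :=
  (pvPad8 (PySem.Chars.replace (PySem.Int.toBinChars0b (c.toNat : Int)) ['0','b'] [])).map
    (fun ch => String.ofList [ch])

def binary_to_matrix (plain_text : String) : List (List (List String)) :=
  let cache_arr := plain_text.toList.foldl (fun acc c => acc ++ [pvCharBitsA c]) []
  (PySem.List.pyRange 0 (PySem.List.len cache_arr) 8).foldl
    (fun acc i => acc ++ [PySem.List.slice cache_arr (some i) (some (i + 8))]) []

-- ===== PORT B =====
-- the inner 'for _ in range(8): bits.append(str(code & 1)); code >>= 1' then 'bits.reverse()';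
-- for the nonnegative 'code', 'code & 1' is mod 2 and 'code >>= 1' is floor division by 2 (exact)
def pvBits (code0 : Int) : List String :=
  (((List.range 8).foldl
      (fun (p : List String × Int) _ =>
        (p.1 ++ [PySem.Int.toStr (PySem.Int.mod p.2 2)], PySem.Int.floordiv p.2 2))
      ([], code0)).1).reverse

def binary_to_matrix_alt (plain_text : String) : List (List (List String)) :=
  let st := plain_text.toList.foldl
    (fun (st : List (List (List String)) × List (List String)) ch =>
      let current := st.2 ++ [pvBits (ch.toNat : Int)]
      if current.length == 8 then (st.1 ++ [current], []) else (st.1, current))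
    ([], [])
  if st.2.isEmpty then st.1 else st.1 ++ [st.2]

-- ===== PRECONDITION & SPEC =====
def Spec_binary_to_matrix (plain_text : String) (out : List (List (List String))) : Prop := out = binary_to_matrix_alt plain_text
instance (plain_text : String) (out : List (List (List String))) : Decidable (Spec_binary_to_matrix plain_text out) := by unfold Spec_binary_to_matrix; infer_instance

-- ===== CLAIM (what is proved, stated in full; the proofs are below) =====
def Claim_equal_binary_to_matrix : Prop := ∀ (plain_text : String), Dom_binary_to_matrix plain_text → Spec_binary_to_matrix plain_text (binary_to_matrix plain_text)

-- ===== LEMMAS AND PROOFS =====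

-- proof-only helper: the common normal form both programs compute — groups of 8, last one partial
def chunk8 {α : Type} (ys : List α) : List (List α) :=
  if h : ys = [] then [] else ys.take 8 :: chunk8 (ys.drop 8)
termination_by ys.length
decreasing_by
  cases ys with
  | nil => exact absurd rfl h
  | cons a t => simp

theorem chunk8_nil {α : Type} : chunk8 ([] : List α) = [] := by
  unfold chunk8; simp

theorem chunk8_cons {α : Type} (ys : List α) (h : ys ≠ []) :
    chunk8 ys = ys.take 8 :: chunk8 (ys.drop 8) := by
  rw [chunk8.eq_def]
  rw [dif_neg h]

-- the per-character conversions agree on every code point of the domain (all < 127)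
theorem pvBits_eq (c : Char) (h : pvDomChar c = true) :
    pvCharBitsA c = pvBits (c.toNat : Int) := by
  have hlt : c.toNat < 127 := by
    simp [pvDomChar] at h; omega
  have key : ∀ n : Nat, n < 127 →
      (pvPad8 (PySem.Chars.replace (PySem.Int.toBinChars0b (n : Int)) ['0','b'] [])).map
        (fun ch => String.ofList [ch]) = pvBits (n : Int) := by
    decide
  simpa [pvCharBitsA] using key c.toNat hlt

theorem slice_shift8 {α : Type} (ys : List α) (i : Int) (hi : 0 ≤ i) :
    PySem.List.slice ys (some (i + 8)) (some (i + 8 + 8)) =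
      PySem.List.slice (ys.drop 8) (some i) (some (i + 8)) := by
  rw [PySem.List.slice_toNat _ (by omega) (by omega),
      PySem.List.slice_toNat _ hi (by omega), List.drop_drop]
  have e1 : (i + 8).toNat = 8 + i.toNat := by omega
  rw [e1]
  congr 1
  omega

-- A's second loop (index-range slicing of the cached list) computes chunk8
theorem slice_chunks {α : Type} :
    ∀ (n : Nat) (ys : List α), ys.length ≤ n →
      (PySem.List.pyRange 0 ((ys.length : Nat) : Int) 8).map
        (fun i => PySem.List.slice ys (some i) (some (i + 8))) = chunk8 ys := by
  intro n
  induction n with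
  | zero =>
    intro ys h
    have : ys = [] := List.length_eq_zero_iff.mp (Nat.le_zero.mp h)
    subst this
    simp [chunk8_nil, PySem.List.pyRange_of_pos 0 0 (by norm_num : (0:Int) < 8)]
  | succ n ih =>
    intro ys h
    cases ys with
    | nil => simp [chunk8_nil, PySem.List.pyRange_of_pos 0 0 (by norm_num : (0:Int) < 8)]
    | cons y t =>
      rw [PySem.List.pyRange_of_pos 0 _ (by norm_num : (0:Int) < 8)]
      have hcnt : (if (0:Int) < (((y :: t).length : Nat) : Int)
            then ((((((y :: t).length : Nat)) : Int) - 0 + 8 - 1) / 8).toNat else 0)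
          = ((y :: t).length - 1) / 8 + 1 := by
        rw [if_pos (by exact_mod_cast Nat.succ_pos t.length)]
        simp only [List.length_cons]
        omega
      rw [hcnt, List.range_succ_eq_map]
      simp only [List.map_cons, List.map_map]
      rw [chunk8_cons _ (by simp)]
      congr 1
      · -- head: slice at [0:8] is take 8
        simp only [Nat.cast_zero, mul_zero, add_zero, zero_add]
        rw [PySem.List.slice_toNat _ (by norm_num) (by norm_num)]
        simp
      · -- tail: shift every index down by 8 and use the induction hypothesis on the drop
        have hn : t.length + 1 ≤ n + 1 := by simpa using h
        have ihd := ih ((y :: t).drop 8) (by simp only [List.length_drop, List.length_cons]; omega)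
        rw [PySem.List.pyRange_of_pos 0 _ (by norm_num : (0:Int) < 8)] at ihd
        have hcnt2 : (if (0:Int) < ((((y :: t).drop 8).length : Nat) : Int)
              then ((((((y :: t).drop 8).length : Nat) : Int) - 0 + 8 - 1) / 8).toNat else 0)
            = ((y :: t).length - 1) / 8 := by
          simp only [List.length_drop, List.length_cons]
          split_ifs with hgt
          · omega
          · omega
        rw [hcnt2] at ihd
        rw [← ihd, List.map_map]
        apply List.map_congr_left
        intro k hk
        simp only [Function.comp_apply]
        have harg : (0 + 8 * ((k.succ : Nat) : Int)) = (0 + 8 * (k : Int)) + 8 := by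
          push_cast; ring
        rw [harg, slice_shift8 _ _ (by positivity)]

-- B's single pass with flush computes chunk8 of the per-character bit lists
theorem fold_flush {α : Type} (g : Char → α) :
    ∀ (xs : List Char) (rows : List (List α)) (cur : List α), cur.length < 8 →
      (if (xs.foldl
            (fun (st : List (List α) × List α) ch =>
              if (st.2 ++ [g ch]).length == 8 then (st.1 ++ [st.2 ++ [g ch]], [])
              else (st.1, st.2 ++ [g ch]))
            (rows, cur)).2.isEmpty
        then (xs.foldl
            (fun (st : List (List α) × List α) ch =>
              if (st.2 ++ [g ch]).length == 8 then (st.1 ++ [st.2 ++ [g ch]], [])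
              else (st.1, st.2 ++ [g ch]))
            (rows, cur)).1
        else (xs.foldl
            (fun (st : List (List α) × List α) ch =>
              if (st.2 ++ [g ch]).length == 8 then (st.1 ++ [st.2 ++ [g ch]], [])
              else (st.1, st.2 ++ [g ch]))
            (rows, cur)).1 ++ [(xs.foldl
            (fun (st : List (List α) × List α) ch =>
              if (st.2 ++ [g ch]).length == 8 then (st.1 ++ [st.2 ++ [g ch]], [])
              else (st.1, st.2 ++ [g ch]))
            (rows, cur)).2])
        = rows ++ chunk8 (cur ++ xs.map g) := by
  intro xs
  induction xs with
  | nil =>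
    intro rows cur hcur
    cases cur with
    | nil => simp [chunk8_nil]
    | cons a t =>
      simp only [List.foldl_nil, List.map_nil, List.append_nil, List.isEmpty_cons]
      rw [chunk8_cons _ (by simp)]
      have h1 : (a :: t).take 8 = a :: t := List.take_of_length_le (by omega)
      have h2 : (a :: t).drop 8 = [] := List.drop_of_length_le (by omega)
      simp [h1, h2, chunk8_nil]
  | cons c cs ihc =>
    intro rows cur hcur
    simp only [List.foldl_cons]
    by_cases h8 : ((cur ++ [g c]).length == 8) = true
    · rw [if_pos h8]
      rw [ihc (rows ++ [cur ++ [g c]]) [] (by norm_num)]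
      have h8' : (cur ++ [g c]).length = 8 := by simpa using h8
      have hsplit : cur ++ (c :: cs).map g = (cur ++ [g c]) ++ cs.map g := by simp
      simp only [List.nil_append]
      rw [hsplit, chunk8_cons ((cur ++ [g c]) ++ List.map g cs) (by
        intro hh
        have hlen := congrArg List.length hh
        simp at hlen)]
      rw [List.take_left' h8', List.drop_left' h8']
      simp
    · rw [if_neg h8]
      rw [ihc rows (cur ++ [g c]) (by simp at h8 ⊢; omega)]
      simp

-- ===== VERDICT (by name: the statement is the Claim_ definition above) =====
theorem binary_to_matrix_spec : Claim_equal_binary_to_matrix := by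
  intro s hDom
  unfold Spec_binary_to_matrix binary_to_matrix binary_to_matrix_alt
  have hmap : s.toList.map pvCharBitsA = s.toList.map (fun c => pvBits (c.toNat : Int)) := by
    apply List.map_congr_left
    intro c hc
    exact pvBits_eq c (by
      have := hDom
      simp [Dom_binary_to_matrix, pvDomStr, List.all_eq_true] at this
      exact this c hc)
  simp only [PySem.List.foldl_append_singleton_eq_map, List.nil_append,
    PySem.List.len_eq, hmap]
  rw [slice_chunks (s.toList.map (fun c => pvBits (c.toNat : Int))).length _ le_rfl]
  have hb := fold_flush (fun c => pvBits (c.toNat : Int)) s.toList [] [] (by norm_num)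
  simpa using hb.symm
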